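-- pv_equiv track=rewrite | github.com/zmanmurphy/Iowa-State-University---COM-S-1270-Code | Labs/Lab_8/filesExercise.py | getIDAssignmentTotals
-- ===== SOURCE A (Python) =====
-- def getIDAssignmentTotals(totalAssignmentsList, originalList):
--     idAssignmentsTotals = []
--     idList = originalList[0]
--     for k in range(len(idList)):
--         idAssignmentsTotals.append(0)
--     for i in range(len(totalAssignmentsList)):
--         for j in range(len(idList)):
--             if totalAssignmentsList[i] == idList[j]:
--                 idAssignmentsTotals[j] = idAssignmentsTotals[j] + 1
--                 break
--     originalList.append(idAssignmentsTotals)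
--     return originalList
-- ===== SOURCE B (Python) =====
-- def getIDAssignmentTotals(totalAssignmentsList, originalList):
--     # Aggregate-then-distribute: count all assignment values once, then walk the
--     # ID row placing each value's total at its first occurrence (duplicates get 0).
--     freq = {}
--     for a in totalAssignmentsList:
--         freq[a] = freq.get(a, 0) + 1
--     idList = originalList[0]
--     seen = set()
--     row = []
--     for v in idList:
--         if v in seen:
--             row.append(0)
--         else:
--             seen.add(v)
--             row.append(freq.get(v, 0))
--     originalList.append(row)
--     return originalList
-- ===== Notes on version B (the rewrite author's own statement) =====
-- stated objective: faster
-- what changed: Inverted the loop structure: instead of tallying each assignment into the ID row's slot via a scan, B first aggregates a frequency counter over the assignments and then distributes each ID's total to its first occurrence in the ID row (later duplicates get 0).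
import Mathlib
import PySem

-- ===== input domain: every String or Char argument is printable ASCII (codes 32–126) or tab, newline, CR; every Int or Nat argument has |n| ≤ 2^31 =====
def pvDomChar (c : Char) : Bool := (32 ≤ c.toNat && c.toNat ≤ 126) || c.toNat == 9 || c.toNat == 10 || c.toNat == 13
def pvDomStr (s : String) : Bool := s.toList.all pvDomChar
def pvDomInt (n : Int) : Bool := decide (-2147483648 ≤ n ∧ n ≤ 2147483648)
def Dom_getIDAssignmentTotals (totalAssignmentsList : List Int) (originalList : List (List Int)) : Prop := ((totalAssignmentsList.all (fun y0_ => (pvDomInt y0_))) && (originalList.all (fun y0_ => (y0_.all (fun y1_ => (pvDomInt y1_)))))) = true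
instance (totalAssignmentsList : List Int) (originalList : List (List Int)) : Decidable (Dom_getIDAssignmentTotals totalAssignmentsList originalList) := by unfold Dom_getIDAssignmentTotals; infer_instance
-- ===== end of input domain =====

-- B inverts A's loop structure: A tallies each assignment into the ID row by scanning it;
-- B aggregates a frequency counter over the assignments once and then distributes each
-- ID's total to its first occurrence in the ID row (objective: faster).
-- NOTE: both A and B mutate originalList in place (append the totals row); the equivalence
-- proved here is about the RETURN value, and B performs the same mutation.

-- ===== PORT A =====
-- inner 'for j in range(len(idList)): if a == idList[j]: acc[j] += 1; break',
-- walking idList and the totals list in step (acc always has idList's length).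
def pvInnerA (a : Int) : List Int → List Int → List Int
  | _, [] => []
  | [], acc => acc
  | v :: vs, c :: cs => if a == v then (c + 1) :: cs else c :: pvInnerA a vs cs

def getIDAssignmentTotals (totalAssignmentsList : List Int) (originalList : List (List Int)) : List (List Int) :=
  let idList := (PySem.List.pyGet? originalList 0).getD []   -- originalList[0]; IndexError on [] excluded by Pre_
  let idAssignmentsTotals := idList.map (fun _ => (0 : Int)) -- one 0 appended per ID
  let totals := totalAssignmentsList.foldl (fun acc a => pvInnerA a idList acc) idAssignmentsTotals
  originalList ++ [totals]

-- ===== PORT B =====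
-- 'freq[a] = freq.get(a, 0) + 1' over the assignments
def pvFreq (tal : List Int) : PySem.Dict Int Int :=
  tal.foldl (fun d a => d.insert a (d.getD a 0 + 1)) PySem.Dict.empty

-- 'for v in idList: row.append(0 if v in seen else freq.get(v, 0)); seen.add(v)'
def pvRow (freq : PySem.Dict Int Int) : List Int → PySem.Set Int → List Int
  | [], _ => []
  | v :: vs, seen =>
    if PySem.Set.contains seen v then (0 : Int) :: pvRow freq vs seen
    else freq.getD v 0 :: pvRow freq vs (PySem.Set.add seen v)

def getIDAssignmentTotals_alt (totalAssignmentsList : List Int) (originalList : List (List Int)) : List (List Int) :=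
  let freq := pvFreq totalAssignmentsList
  let idList := (PySem.List.pyGet? originalList 0).getD []
  let row := pvRow freq idList PySem.Set.empty
  originalList ++ [row]

-- ===== PRECONDITION & SPEC =====
-- Pre_ excludes only originalList = [], where A raises IndexError on originalList[0] (B raises too).
def Pre_getIDAssignmentTotals (_totalAssignmentsList : List Int) (originalList : List (List Int)) : Prop := originalList ≠ []
instance (totalAssignmentsList : List Int) (originalList : List (List Int)) : Decidable (Pre_getIDAssignmentTotals totalAssignmentsList originalList) := by unfold Pre_getIDAssignmentTotals; infer_instance
def pvWitness_getIDAssignmentTotals : List Int × List (List Int) := ([1, 2, 1], [[1, 2, 3]])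

def Spec_getIDAssignmentTotals (totalAssignmentsList : List Int) (originalList : List (List Int)) (out : List (List Int)) : Prop := out = getIDAssignmentTotals_alt totalAssignmentsList originalList
instance (totalAssignmentsList : List Int) (originalList : List (List Int)) (out : List (List Int)) : Decidable (Spec_getIDAssignmentTotals totalAssignmentsList originalList out) := by unfold Spec_getIDAssignmentTotals; infer_instance

-- ===== CLAIM (what is proved, stated in full; the proofs are below) =====
def Claim_equal_getIDAssignmentTotals : Prop := ∀ (totalAssignmentsList : List Int) (originalList : List (List Int)), Dom_getIDAssignmentTotals totalAssignmentsList originalList → Pre_getIDAssignmentTotals totalAssignmentsList originalList → Spec_getIDAssignmentTotals totalAssignmentsList originalList (getIDAssignmentTotals totalAssignmentsList originalList)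

-- ===== LEMMAS AND PROOFS =====

-- A's inner scan-with-break, elementwise: it adds 1 exactly at the first index matching a.
theorem pvInnerA_get (a : Int) (vs : List Int) : ∀ (acc : List Int) (j : Nat),
    acc.length = vs.length →
    (pvInnerA a vs acc)[j]? =
      acc[j]?.map (fun c => c + if vs[j]? = some a ∧ a ∉ vs.take j then 1 else 0) := by
  induction vs with
  | nil =>
    intro acc j h
    cases acc with
    | nil => simp [pvInnerA]
    | cons c cs => simp at h
  | cons v vs ih =>
    intro acc j h
    cases acc with
    | nil => simp at h
    | cons c cs =>
      simp only [List.length_cons, Nat.succ_inj] at h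
      by_cases hv : a = v
      · subst hv
        cases j with
        | zero => simp [pvInnerA]
        | succ j =>
          simp only [pvInnerA, BEq.rfl, if_true, List.getElem?_cons_succ, List.take_succ_cons]
          simp
      · have hbv : (a == v) = false := by simp [hv]
        cases j with
        | zero => simp [pvInnerA, hbv, Ne.symm hv]
        | succ j =>
          simp only [pvInnerA, hbv, Bool.false_eq_true, if_false, List.getElem?_cons_succ,
            List.take_succ_cons]
          rw [ih cs j h]
          have : (vs[j]? = some a ∧ a ∉ v :: vs.take j) ↔ (vs[j]? = some a ∧ a ∉ vs.take j) := by
            constructor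
            · rintro ⟨h1, h2⟩; exact ⟨h1, fun hm => h2 (List.mem_cons_of_mem _ hm)⟩
            · rintro ⟨h1, h2⟩
              refine ⟨h1, fun hm => ?_⟩
              rcases List.mem_cons.mp hm with h3 | h3
              · exact hv h3
              · exact h2 h3
          simp only [this]

theorem pvInnerA_length (a : Int) (vs : List Int) : ∀ (acc : List Int),
    acc.length = vs.length → (pvInnerA a vs acc).length = vs.length := by
  induction vs with
  | nil => intro acc h; cases acc <;> simp_all [pvInnerA]
  | cons v vs ih =>
    intro acc h
    cases acc with
    | nil => simp at h
    | cons c cs =>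
      simp only [List.length_cons, Nat.succ_inj] at h
      by_cases hv : (a == v) <;> simp [pvInnerA, hv, ih cs h, h]

-- A's whole tally loop, elementwise: entry j gains one per assignment whose first match is j.
theorem pvFoldA_get (vs : List Int) (tal : List Int) : ∀ (acc : List Int) (j : Nat),
    acc.length = vs.length →
    (tal.foldl (fun acc a => pvInnerA a vs acc) acc)[j]? =
      acc[j]?.map (fun c =>
        c + (tal.countP (fun a => decide (vs[j]? = some a ∧ a ∉ vs.take j)) : Int)) := by
  induction tal with
  | nil =>
    intro acc j h
    cases hg : acc[j]? <;> simp [hg]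
  | cons a tal ih =>
    intro acc j h
    simp only [List.foldl_cons]
    rw [ih _ j (pvInnerA_length a vs acc h), pvInnerA_get a vs acc j h, List.countP_cons]
    cases hg : acc[j]? with
    | none => simp
    | some c =>
      simp only [Option.map_some, Option.some_inj]
      by_cases hc : (vs[j]? = some a ∧ a ∉ vs.take j)
      · rw [if_pos hc, if_pos (decide_eq_true hc)]
        push_cast
        ring
      · rw [if_neg hc, if_neg (by simp [hc])]
        simp

-- B's distribution pass, elementwise.
theorem pvRow_get (freq : PySem.Dict Int Int) (vs : List Int) : ∀ (seen : PySem.Set Int) (j : Nat),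
    (pvRow freq vs seen)[j]? =
      vs[j]?.map (fun v => if v ∈ seen ∨ v ∈ vs.take j then (0 : Int) else freq.getD v 0) := by
  induction vs with
  | nil => intro seen j; simp [pvRow]
  | cons v vs ih =>
    intro seen j
    by_cases hs : PySem.Set.contains seen v
    · have hsm : v ∈ seen := by simpa [PySem.Set.contains_iff] using hs
      cases j with
      | zero => simp [pvRow, hsm]
      | succ j =>
        simp only [pvRow, hs, if_true, List.getElem?_cons_succ, List.take_succ_cons]
        rw [ih seen j]
        cases hg : vs[j]? with
        | none => simp
        | some w =>
          simp only [Option.map_some, Option.some_inj]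
          by_cases hw : w = v
          · subst hw; simp [hsm]
          · have : (w ∈ seen ∨ w ∈ v :: vs.take j) ↔ (w ∈ seen ∨ w ∈ vs.take j) := by
              simp [List.mem_cons, hw]
            simp only [this]
    · have hsm : v ∉ seen := by simpa [PySem.Set.contains_iff] using hs
      cases j with
      | zero => simp [pvRow, hsm]
      | succ j =>
        simp only [pvRow, hs, Bool.false_eq_true, if_false, List.getElem?_cons_succ,
          List.take_succ_cons]
        rw [ih (PySem.Set.add seen v) j]
        cases hg : vs[j]? with
        | none => simp
        | some w =>
          simp only [Option.map_some, Option.some_inj]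
          have : (w ∈ PySem.Set.add seen v ∨ w ∈ vs.take j) ↔ (w ∈ seen ∨ w ∈ v :: vs.take j) := by
            simp [PySem.Set.mem_add, List.mem_cons]; tauto
          exact if_congr this rfl rfl

-- the counter holds each value's multiplicity in the assignments
theorem pvFreq_getD (tal : List Int) (v : Int) : (pvFreq tal).getD v 0 = (tal.count v : Int) := by
  unfold pvFreq
  rw [PySem.Dict.getD_foldl_insert_add_one]
  simp [PySem.Dict.getD_empty]

-- per-entry agreement of A's tally with B's distribute
theorem pv_entry_eq (tal S : List Int) (v : Int) :
    ((tal.countP (fun a => decide (v = a ∧ a ∉ S))) : Int)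
      = if v ∈ S then (0 : Int) else (tal.count v : Int) := by
  by_cases hm : v ∈ S
  · have h0 : tal.countP (fun a => decide (v = a ∧ a ∉ S)) = 0 := by
      apply List.countP_eq_zero.mpr
      intro a _
      simp only [decide_eq_true_eq, not_and, not_not]
      rintro rfl
      exact hm
    rw [h0]; simp [hm]
  · have hc : tal.countP (fun a => decide (v = a ∧ a ∉ S)) = tal.count v := by
      rw [List.count]
      apply List.countP_congr
      intro a _
      simp only [decide_eq_true_eq, beq_iff_eq]
      constructor
      · rintro ⟨h1, _⟩; exact h1.symm
      · rintro rfl; exact ⟨rfl, hm⟩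
    rw [hc]; simp [hm]

-- ===== VERDICT (by name: the statement is the Claim_ definition above) =====
theorem getIDAssignmentTotals_spec : Claim_equal_getIDAssignmentTotals := by
  intro tal ol _ hpre
  unfold Spec_getIDAssignmentTotals getIDAssignmentTotals getIDAssignmentTotals_alt
  cases ol with
  | nil => exact absurd rfl hpre
  | cons idList rest =>
    simp only [PySem.List.pyGet?_zero_cons, Option.getD_some, List.append_cancel_left_eq,
      List.cons.injEq, and_true]
    apply List.ext_getElem?
    intro j
    rw [pvFoldA_get idList tal _ j (by simp), pvRow_get (pvFreq tal) idList PySem.Set.empty j]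
    cases hg : idList[j]? with
    | none =>
      simp
      exact List.getElem?_eq_none_iff.mp hg
    | some v =>
      have hmap : (idList.map (fun _ => (0 : Int)))[j]? = some 0 := by
        simp [(List.getElem?_eq_some_iff.mp hg).1]
      simp only [hmap, Option.map_some, Option.some_inj]
      rw [pvFreq_getD tal v]
      rw [pv_entry_eq tal (idList.take j) v]
      simp
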